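-- pv_equiv track=rewrite | github.com/YuXuan928/Python | 1.Python/作業/作業2/2.1.2Triangle_Diamond(△▽◇)1方法.py | ShowChart
-- ===== SOURCE A (Python) =====
-- def ShowChart(n, x):
--     #i, j, k, y, z   #y為z的終值，z為外迴圈的變數；j,k內迴圈的變數；i為控制j,k的重要控制變數
--     s, t, str = "★", "　", ""
--     i = n if x==2 else 1              #x==2倒▽時 i=n, 其他(x=1或x=3) i=1
--     y = 2 * n - 1 if x == 3 else n;   #x==3菱形時 y=2*n-1(跑2*n-1圈)；其他(x=1或x=2) y=n(跑n圈)
--     for z in range(1, y+1):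
--         #!!以下式 '　'*(n-i) [加空白] + (s+t)*i [加一個星及一個空白]
--         str+=('　'*(n-i) + (s+t)*i)      #同上二迴圈功能
--         str += "\n"
--
--         if (x == 3):                     #菱形時:
--             i = i+1 if z < n else i - 1  #上半段i遞增；下半段i遞減
--         else:
--             i= i+1 if x==1 else i-1 if x==2 else i    #x==1時,正△i遞增；x == 2時,倒▽i遞減
--     return str
-- ===== SOURCE B (Python) =====
-- def ShowChart(n, x):
--     if x == 1:
--         widths = list(range(1, n + 1))
--     elif x == 2:
--         widths = list(range(n, 0, -1))
--     elif x == 3: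
--         widths = list(range(1, n + 1)) + list(range(n - 1, 0, -1))
--     else:
--         widths = [1] * n
--     return "".join("　" * (n - w) + "★　" * w + "\n" for w in widths)
-- ===== Notes on version B (the rewrite author's own statement) =====
-- stated objective: simpler
-- what changed: B computes the list of row star-widths directly per case (ranges / their concatenation / replication) and joins the rendered rows, replacing A's single loop that threads and branch-updates a mutable width counter i on every iteration.
import Mathlib
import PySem

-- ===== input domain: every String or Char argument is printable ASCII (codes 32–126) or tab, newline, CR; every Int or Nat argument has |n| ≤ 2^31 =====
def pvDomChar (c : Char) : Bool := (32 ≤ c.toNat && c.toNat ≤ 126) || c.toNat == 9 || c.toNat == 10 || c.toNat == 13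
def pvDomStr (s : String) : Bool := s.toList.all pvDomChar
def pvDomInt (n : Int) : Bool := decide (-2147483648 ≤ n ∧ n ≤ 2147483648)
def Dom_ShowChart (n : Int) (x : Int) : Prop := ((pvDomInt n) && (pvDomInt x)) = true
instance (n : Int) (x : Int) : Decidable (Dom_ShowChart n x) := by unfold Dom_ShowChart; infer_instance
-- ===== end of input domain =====

-- B replaces A's stateful counter loop by computing each row's star-width directly (per-case width list, then join); objective: simpler.

-- Python string repetition s * k (empty for k ≤ 0), on List Char — exact
def pvStrMul (s : List Char) (k : Int) : List Char := (List.replicate k.toNat s).flatten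

-- ===== PORT A =====
def ShowChart (n : Int) (x : Int) : String :=
  -- s = "★", t = "　", str = ""
  let i0 : Int := if x == 2 then n else 1
  let y : Int := if x == 3 then 2 * n - 1 else n
  let st :=
    (PySem.List.pyRange 1 (y + 1) 1).foldl
      (fun (st : List Char × Int) z =>
        let str := st.1 ++ (pvStrMul ['　'] (n - st.2) ++ pvStrMul (['★'] ++ ['　']) st.2)
        let str := str ++ ['\n']
        let i := if x == 3 then (if z < n then st.2 + 1 else st.2 - 1)
                 else (if x == 1 then st.2 + 1 else if x == 2 then st.2 - 1 else st.2)
        (str, i))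
      (([] : List Char), i0)
  String.ofList st.1

-- ===== PORT B =====
def ShowChart_alt (n : Int) (x : Int) : String :=
  let widths : List Int :=
    if x == 1 then PySem.List.pyRange 1 (n + 1) 1
    else if x == 2 then PySem.List.pyRange n 0 (-1)
    else if x == 3 then PySem.List.pyRange 1 (n + 1) 1 ++ PySem.List.pyRange (n - 1) 0 (-1)
    else PySem.List.pyRepeat [(1 : Int)] n
  String.ofList (PySem.Chars.join []
    (widths.map (fun w => pvStrMul ['　'] (n - w) ++ pvStrMul (['★'] ++ ['　']) w ++ ['\n'])))

-- ===== PRECONDITION & SPEC =====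
def Spec_ShowChart (n : Int) (x : Int) (out : String) : Prop := out = ShowChart_alt n x
instance (n : Int) (x : Int) (out : String) : Decidable (Spec_ShowChart n x out) := by unfold Spec_ShowChart; infer_instance

-- ===== CLAIM (what is proved, stated in full; the proofs are below) =====
def Claim_equal_ShowChart : Prop := ∀ (n : Int) (x : Int), Dom_ShowChart n x → Spec_ShowChart n x (ShowChart n x)

-- ===== LEMMAS AND PROOFS =====

-- one rendered row
def pvRow (n i : Int) : List Char :=
  pvStrMul ['　'] (n - i) ++ pvStrMul (['★'] ++ ['　']) i ++ ['\n']

-- A's counter update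
def pvUpd (n x z i : Int) : Int :=
  if x == 3 then (if z < n then i + 1 else i - 1)
  else (if x == 1 then i + 1 else if x == 2 then i - 1 else i)

-- the sequence of rows A's loop emits from counter i over remaining z-values zs
def pvRows (n x : Int) : List Int → Int → List Char
  | [], _ => []
  | z :: zs, i => pvRow n i ++ pvRows n x zs (pvUpd n x z i)

-- final counter value
def pvFin (n x : Int) (zs : List Int) (i : Int) : Int :=
  zs.foldl (fun i z => pvUpd n x z i) i

theorem pvJoin_nil_flatten (l : List (List Char)) :
    PySem.Chars.join [] l = l.flatten := by
  induction l with
  | nil => simp [PySem.Chars.join, List.intercalate, List.intersperse]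
  | cons a l ih =>
    cases l with
    | nil => simp [PySem.Chars.join, List.intercalate, List.intersperse]
    | cons b l => simp_all [PySem.Chars.join, List.intercalate, List.intersperse, List.flatten]

theorem pvLoop_eq (n x : Int) (zs : List Int) (acc : List Char) (i : Int) :
    (zs.foldl
      (fun (st : List Char × Int) z =>
        let str := st.1 ++ (pvStrMul ['　'] (n - st.2) ++ pvStrMul (['★'] ++ ['　']) st.2)
        let str := str ++ ['\n']
        let i := if x == 3 then (if z < n then st.2 + 1 else st.2 - 1)
                 else (if x == 1 then st.2 + 1 else if x == 2 then st.2 - 1 else st.2)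
        (str, i)) (acc, i)) =
      (acc ++ pvRows n x zs i, pvFin n x zs i) := by
  induction zs generalizing acc i with
  | nil => simp [pvRows, pvFin]
  | cons z zs ih =>
    simp only [List.foldl_cons]
    rw [ih]
    simp [pvRows, pvRow, pvUpd, pvFin, List.append_assoc]

theorem pvRows_append (n x : Int) (zsa zsb : List Int) (i : Int) :
    pvRows n x (zsa ++ zsb) i = pvRows n x zsa i ++ pvRows n x zsb (pvFin n x zsa i) := by
  induction zsa generalizing i with
  | nil => simp [pvRows, pvFin]
  | cons z zs ih =>
    simp only [List.cons_append, pvRows, ih, pvFin, List.foldl_cons, List.append_assoc]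

-- counting-up segment: x = 3 with every z < n (update +1); also yields the final counter
theorem pvRows_up3 (n : Int) (zs : List Int) (i : Int) (h : ∀ z ∈ zs, z < n) :
    pvRows n 3 zs i = (PySem.List.pyRange i (i + zs.length) 1).flatMap (pvRow n) ∧
      pvFin n 3 zs i = i + zs.length := by
  induction zs generalizing i with
  | nil => simp [pvRows, pvFin, PySem.List.pyRange_one_eq_nil (le_refl i)]
  | cons z zs ih =>
    have hz : z < n := h z (by simp)
    have hu : pvUpd n 3 z i = i + 1 := by simp [pvUpd, hz]
    have hb : i + ((z :: zs).length : Int) = (i + 1) + (zs.length : Int) := by simp; ring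
    have ih' := ih (i + 1) (fun w hw => h w (by simp [hw]))
    constructor
    · rw [hb, PySem.List.pyRange_one_cons (by omega)]
      simp only [pvRows, hu, List.flatMap_cons, ih'.1]
    · simp only [pvFin, List.foldl_cons] at ih' ⊢
      rw [hu, ih'.2, hb]

theorem pvRows_up1 (n : Int) (zs : List Int) (i : Int) :
    pvRows n 1 zs i = (PySem.List.pyRange i (i + zs.length) 1).flatMap (pvRow n) := by
  induction zs generalizing i with
  | nil => simp [pvRows, PySem.List.pyRange_one_eq_nil (le_refl i)]
  | cons z zs ih =>
    have hu : pvUpd n 1 z i = i + 1 := by simp [pvUpd]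
    have hb : i + ((z :: zs).length : Int) = (i + 1) + (zs.length : Int) := by simp; ring
    rw [hb, PySem.List.pyRange_one_cons (by omega)]
    simp only [pvRows, hu, List.flatMap_cons, ih (i + 1)]

-- counting-down segments (update -1)
theorem pvRows_down2 (n : Int) (zs : List Int) (i : Int) :
    pvRows n 2 zs i = (PySem.List.pyRange i (i - zs.length) (-1)).flatMap (pvRow n) := by
  induction zs generalizing i with
  | nil => simp [pvRows, PySem.List.pyRange_neg_one_eq_nil (le_refl i)]
  | cons z zs ih =>
    have hu : pvUpd n 2 z i = i - 1 := by simp [pvUpd]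
    have hb : i - ((z :: zs).length : Int) = (i - 1) - (zs.length : Int) := by simp; ring
    rw [hb, PySem.List.pyRange_neg_one_cons (by omega)]
    simp only [pvRows, hu, List.flatMap_cons, ih (i - 1)]

theorem pvRows_down3 (n : Int) (zs : List Int) (i : Int) (h : ∀ z ∈ zs, n ≤ z) :
    pvRows n 3 zs i = (PySem.List.pyRange i (i - zs.length) (-1)).flatMap (pvRow n) := by
  induction zs generalizing i with
  | nil => simp [pvRows, PySem.List.pyRange_neg_one_eq_nil (le_refl i)]
  | cons z zs ih =>
    have hz : ¬ z < n := by have := h z (by simp); omega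
    have hu : pvUpd n 3 z i = i - 1 := by simp [pvUpd, hz]
    have hb : i - ((z :: zs).length : Int) = (i - 1) - (zs.length : Int) := by simp; ring
    rw [hb, PySem.List.pyRange_neg_one_cons (by omega)]
    simp only [pvRows, hu, List.flatMap_cons, ih (i - 1) (fun w hw => h w (by simp [hw]))]

-- constant segment: x ∉ {1,2,3} (update id)
theorem pvRows_const (n x : Int) (h1 : x ≠ 1) (h2 : x ≠ 2) (h3 : x ≠ 3)
    (zs : List Int) (i : Int) :
    pvRows n x zs i = (List.replicate zs.length i).flatMap (pvRow n) := by
  induction zs generalizing i with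
  | nil => simp [pvRows]
  | cons z zs ih =>
    have hu : pvUpd n x z i = i := by simp [pvUpd, h1, h2, h3]
    simp only [pvRows, hu, List.length_cons, List.replicate_succ, List.flatMap_cons, ih]

-- ===== VERDICT (by name: the statement is the Claim_ definition above) =====
theorem ShowChart_spec : Claim_equal_ShowChart := by
  intro n x _
  unfold Spec_ShowChart ShowChart ShowChart_alt
  simp only [pvLoop_eq, List.nil_append]
  rw [pvJoin_nil_flatten, ← List.flatMap_def]
  congr 1
  show pvRows n x _ _ = _
  by_cases h1 : x = 1
  · subst h1
    simp only [show ((1:Int) == 1) = true from rfl, show ((1:Int) == 2) = false from rfl,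
      show ((1:Int) == 3) = false from rfl, Bool.false_eq_true, if_false, if_true]
    rw [pvRows_up1]
    by_cases hn : 0 ≤ n
    · congr 2
      rw [PySem.List.length_pyRange_one]; omega
    · rw [PySem.List.pyRange_one_eq_nil (show n + 1 ≤ 1 by omega)]
      simp [PySem.List.pyRange_one_eq_nil (le_refl (1 : Int))]
  · by_cases h2 : x = 2
    · subst h2
      simp only [show ((2:Int) == 1) = false from rfl, show ((2:Int) == 2) = true from rfl,
        show ((2:Int) == 3) = false from rfl, Bool.false_eq_true, if_false, if_true]
      rw [pvRows_down2]
      by_cases hn : 0 ≤ n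
      · congr 2
        rw [PySem.List.length_pyRange_one]; omega
      · rw [PySem.List.pyRange_one_eq_nil (show n + 1 ≤ 1 by omega),
          PySem.List.pyRange_neg_one_eq_nil (show n ≤ 0 by omega)]
        simp [PySem.List.pyRange_neg_one_eq_nil (le_refl n)]
    · by_cases h3 : x = 3
      · subst h3
        simp only [show ((3:Int) == 1) = false from rfl, show ((3:Int) == 2) = false from rfl,
          show ((3:Int) == 3) = true from rfl, Bool.false_eq_true, if_false, if_true]
        by_cases hn : 0 < n
        · -- split the z-range 1..2n-1 at n
          rw [show (2 * n - 1 + 1) = 2 * n by ring,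
            PySem.List.pyRange_one_append 1 n (2 * n) (by omega) (by omega),
            pvRows_append]
          have seg1 := pvRows_up3 n (PySem.List.pyRange 1 n 1) 1
            (fun z hz => ((PySem.List.mem_pyRange_one).1 hz).2)
          have hlen1 : ((PySem.List.pyRange 1 n 1).length : Int) = n - 1 := by
            rw [PySem.List.length_pyRange_one]; omega
          have hlen2 : ((PySem.List.pyRange n (2 * n) 1).length : Int) = n := by
            rw [PySem.List.length_pyRange_one]; omega
          rw [seg1.1, hlen1, show (1 : Int) + (n - 1) = n by ring,
            show pvFin n 3 (PySem.List.pyRange 1 n 1) 1 = n from by rw [seg1.2, hlen1]; ring,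
            pvRows_down3 n _ n (fun z hz => ((PySem.List.mem_pyRange_one).1 hz).1),
            hlen2, show n - n = (0 : Int) by ring]
          -- B's widths [1..n] ++ [n-1..1]  =  [1..n-1] ++ ([n] ++ [n-1..1])
          rw [PySem.List.pyRange_one_succ_right (show (1:Int) ≤ n from by omega),
            show PySem.List.pyRange n 0 (-1) = n :: PySem.List.pyRange (n - 1) 0 (-1) from
              PySem.List.pyRange_neg_one_cons (by omega)]
          have hrow : pvRow n = (fun w => pvStrMul ['　'] (n - w) ++ (pvStrMul ['★', '　'] w ++ ['\n'])) := by
            funext w; simp [pvRow]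
          simp [hrow, List.flatMap_append, sub_self]
        · rw [PySem.List.pyRange_one_eq_nil (show 2 * n - 1 + 1 ≤ 1 by omega),
            PySem.List.pyRange_one_eq_nil (show n + 1 ≤ 1 by omega),
            PySem.List.pyRange_neg_one_eq_nil (show n - 1 ≤ 0 by omega)]
          simp [pvRows]
      · simp only [show (x == 1) = false by simp [h1], show (x == 2) = false by simp [h2],
          show (x == 3) = false by simp [h3], Bool.false_eq_true, if_false]
        rw [pvRows_const n x h1 h2 h3, PySem.List.pyRepeat_singleton]
        congr 2
        rw [PySem.List.length_pyRange_one]; omega
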